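-- pv_equiv track=rewrite | github.com/wiranegara777/arkedemy-answer | nomor_5.py | oddSum
-- ===== SOURCE A (Python) =====
-- def oddSum(n):
--     start = 0
--     next = 1
--     sumOdd = 0
--     for i in range(n):
--         current = start + next
--         start = next
--         next = current
--         if current % 2 != 0 and current < n:
--             sumOdd += current
--     return sumOdd
-- ===== SOURCE B (Python) =====
-- def oddSum(n):
--     a, b = 0, 1
--     s = 0
--     c = a + b
--     while c < n:
--         if c % 2 != 0:
--             s += c
--         a, b = b, c
--         c = a + b
--     return s
-- ===== Notes on version B (the rewrite author's own statement) =====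
-- stated objective: faster
-- what changed: B iterates Fibonacci numbers only while they are below n instead of running n loop iterations with a guard, so it stops after O(log n) steps.
import Mathlib
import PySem

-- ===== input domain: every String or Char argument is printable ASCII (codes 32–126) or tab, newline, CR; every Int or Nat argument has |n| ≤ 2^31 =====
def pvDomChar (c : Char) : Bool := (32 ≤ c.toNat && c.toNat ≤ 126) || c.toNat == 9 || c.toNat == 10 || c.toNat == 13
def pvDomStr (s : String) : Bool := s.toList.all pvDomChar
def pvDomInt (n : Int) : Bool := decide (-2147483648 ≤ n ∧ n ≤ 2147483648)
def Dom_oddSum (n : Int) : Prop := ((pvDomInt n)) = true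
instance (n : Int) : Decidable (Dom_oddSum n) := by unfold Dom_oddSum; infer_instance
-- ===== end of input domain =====

-- B stops iterating Fibonacci numbers as soon as they reach n instead of running n
-- loop iterations with a guard (objective: faster, O(log n) loop steps vs O(n)).

-- ===== PORT A =====
-- state (start, next, sumOdd); for i in range(n): current = start+next; shift; conditionally add
def oddSum (n : Int) : Int :=
  ((PySem.List.pyRange 0 n 1).foldl
    (fun (st : Int × Int × Int) _ =>
      let current := st.1 + st.2.1
      (st.2.1, current,
        if PySem.Int.mod current 2 ≠ 0 ∧ current < n then st.2.2 + current else st.2.2))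
    (0, 1, 0)).2.2

-- ===== PORT B =====
-- while c < n loop of Source B; the proof arguments 0 ≤ a, 1 ≤ b only justify termination
def oddSumAux (n a b s : Int) (ha : 0 ≤ a) (hb : 1 ≤ b) : Int :=
  if h : a + b < n then
    oddSumAux n b (a + b)
      (if PySem.Int.mod (a + b) 2 ≠ 0 then s + (a + b) else s)
      (by omega) (by omega)
  else s
termination_by (n - (a + b)).toNat
decreasing_by omega

def oddSum_alt (n : Int) : Int := oddSumAux n 0 1 0 (by omega) (by omega)

-- ===== PRECONDITION & SPEC =====
def Spec_oddSum (n : Int) (out : Int) : Prop := out = oddSum_alt n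
instance (n : Int) (out : Int) : Decidable (Spec_oddSum n out) := by unfold Spec_oddSum; infer_instance

-- ===== CLAIM (what is proved, stated in full; the proofs are below) =====
def Claim_equal_oddSum : Prop := ∀ (n : Int), Dom_oddSum n → Spec_oddSum n (oddSum n)

-- ===== LEMMAS AND PROOFS =====

-- A's loop body, named for the proofs (definitionally the lambda inside oddSum)
def stepA (n : Int) (st : Int × Int × Int) : Int × Int × Int :=
  let current := st.1 + st.2.1
  (st.2.1, current,
    if PySem.Int.mod current 2 ≠ 0 ∧ current < n then st.2.2 + current else st.2.2)

theorem foldl_const_iterate {α β : Type} (f : α → α) (l : List β) (i : α) :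
    l.foldl (fun s _ => f s) i = f^[l.length] i := by
  induction l generalizing i with
  | nil => rfl
  | cons x xs ih => simpa [Function.iterate_succ_apply] using ih (f i)

theorem oddSum_eq_iterate (n : Int) :
    oddSum n = ((stepA n)^[n.toNat] (0, 1, 0)).2.2 := by
  show (((PySem.List.pyRange 0 n 1).foldl (fun st _ => stepA n st) (0, 1, 0))).2.2 = _
  rw [foldl_const_iterate, PySem.List.length_pyRange_one]
  norm_num

theorem oddSumAux_stop (n a b s : Int) (ha : 0 ≤ a) (hb : 1 ≤ b) (h : ¬ a + b < n) :
    oddSumAux n a b s ha hb = s := by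
  rw [oddSumAux]; simp [h]

theorem key (k : Nat) : ∀ (n a b s : Int) (ha : 0 ≤ a) (hb : 1 ≤ b),
    n ≤ (k : Int) + (a + b) →
    ((stepA n)^[k] (a, b, s)).2.2 = oddSumAux n a b s ha hb := by
  induction k with
  | zero =>
    intro n a b s ha hb hk
    simp only [Function.iterate_zero, id]
    rw [oddSumAux_stop n a b s ha hb (by omega)]
  | succ k ih =>
    intro n a b s ha hb hk
    rw [Function.iterate_succ_apply]
    by_cases h : a + b < n
    · rw [oddSumAux]
      rw [dif_pos h]
      have : stepA n (a, b, s)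
          = (b, a + b, if PySem.Int.mod (a + b) 2 ≠ 0 then s + (a + b) else s) := by
        simp only [stepA]
        by_cases hm : PySem.Int.mod (a + b) 2 ≠ 0 <;> simp [h]
      rw [this]
      exact ih n b (a + b) _ (by omega) (by omega) (by omega)
    · rw [oddSumAux_stop n a b s ha hb h]
      have : stepA n (a, b, s) = (b, a + b, s) := by
        simp only [stepA]
        simp [h]
      rw [this]
      rw [ih n b (a + b) s (by omega) (by omega) (by omega)]
      exact oddSumAux_stop n b (a + b) s _ _ (by omega)

-- ===== VERDICT (by name: the statement is the Claim_ definition above) =====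
theorem oddSum_spec : Claim_equal_oddSum := by
  intro n _
  unfold Spec_oddSum oddSum_alt
  rw [oddSum_eq_iterate]
  exact key n.toNat n 0 1 0 (by omega) (by omega) (by omega)
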